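-- pv_equiv track=rewrite | github.com/22Abhi2000/FstRepo | GAGAN_WITH_CMD.py | decode_channel_status_meaning
-- ===== SOURCE A (Python) =====
-- def decode_channel_status_meaning(status_word):
--     """
--     Decodes a 16-bit channel status word according to the custom mapping:
--     T   - Bits 0+1: Track/Bit Sync
--     E   - Bit 2: Ephemeris Av
--     P   - Bit 3: Used in Pos
--     I   - Bit 4: Iono Correction Av
--     S   - Bit 5: SBAS Correction Av
--     P1  - Bit 6: PR Validity Reject
--     H   - Bit 7: URA/Health
--     A   - Bits 8+9: Antenna select (2 bits)
--     SR  - Bit 10: SBAS Reject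
--     R   - Bit 11: RAIM Reject
--     E1  - Bit 12: L1/L2 Ephem Indicator
--     D   - Bit 14: DR Status
--     """
--     bits = [(status_word >> i) & 1 for i in range(16)]
--     # T: Bits 0 and 1 combined description
--     T = "T" if bits[0] else "NT"
--     S = "S" if bits[1] else "NS"
--     # A: Bits 8 and 9 combined (antenna select)
--     antenna_bits = (bits[9] << 1) | bits[8]
--     antenna_map = {
--         0b00: "1",
--         0b01: "2",
--         0b10: "3",
--         0b11: "4",
--     }
--
--     return {
--         "T": f"{T}/{S}",
--         "E": "Y" if bits[2] else "N",
--         "P": "Y" if bits[3] else "N",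
--         "I": "Y" if bits[4] else "N",
--         "S": "Y" if bits[5] else "N",
--         "P1": "P" if bits[6] else "R",
--         "H": "G" if bits[7] else "B",
--         "A": antenna_map.get(antenna_bits, "UK"),
--         "SR": "P" if bits[10] else "R",
--         "R": "P" if bits[11] else "R",
--         "E1": "Y" if bits[12] else "N",
--         "D": "Y" if bits[14] else "N",
--     }
-- ===== SOURCE B (Python) =====
-- # Uniform table-driven decoder: every field (including the 2-bit "T" and "A"
-- # fields) is one entry (key, shift, mask, value_table); the result is a single
-- # dict comprehension indexing the value table by the extracted bit group.
-- _FIELDS = [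
--     ("T",  0, 3, ("NT/NS", "T/NS", "NT/S", "T/S")),
--     ("E",  2, 1, ("N", "Y")),
--     ("P",  3, 1, ("N", "Y")),
--     ("I",  4, 1, ("N", "Y")),
--     ("S",  5, 1, ("N", "Y")),
--     ("P1", 6, 1, ("R", "P")),
--     ("H",  7, 1, ("B", "G")),
--     ("A",  8, 3, ("1", "2", "3", "4")),
--     ("SR", 10, 1, ("R", "P")),
--     ("R",  11, 1, ("R", "P")),
--     ("E1", 12, 1, ("N", "Y")),
--     ("D",  14, 1, ("N", "Y")),
-- ]
--
-- def decode_channel_status_meaning(status_word):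
--     return {key: values[(status_word >> shift) & mask]
--             for key, shift, mask, values in _FIELDS}
-- ===== Notes on version B (the rewrite author's own statement) =====
-- stated objective: idiomatic
-- what changed: Replaces the precomputed 16-entry bits list, per-field conditionals and f-string/antenna special cases with one uniform spec table (key, shift, mask, value table) and a single comprehension that indexes each value table by the extracted bit group (the 2-bit T and A fields become plain table lookups too).
import Mathlib
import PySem

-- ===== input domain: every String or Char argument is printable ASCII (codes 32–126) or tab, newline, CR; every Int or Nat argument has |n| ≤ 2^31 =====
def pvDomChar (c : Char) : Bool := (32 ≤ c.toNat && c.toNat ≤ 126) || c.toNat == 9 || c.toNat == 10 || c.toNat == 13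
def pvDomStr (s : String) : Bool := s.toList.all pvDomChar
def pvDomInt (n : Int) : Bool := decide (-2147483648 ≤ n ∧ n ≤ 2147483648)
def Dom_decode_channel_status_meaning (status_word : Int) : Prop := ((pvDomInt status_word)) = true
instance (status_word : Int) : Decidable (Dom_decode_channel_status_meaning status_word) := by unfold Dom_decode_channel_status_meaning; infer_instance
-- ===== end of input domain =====

-- B replaces A's bits-list + literal dict construction with one uniform field table
-- (key, shift, mask, value table) mapped to the result; objective: idiomatic, same cost.

-- ===== PORT A =====
def decode_channel_status_meaning (status_word : Int) : List (String × String) :=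
  -- bits = [(status_word >> i) & 1 for i in range(16)]  (each i from pyRange is ≥ 0, so i.toNat is exact)
  let bits : List Int :=
    (PySem.List.pyRange 0 16 1).map (fun i => PySem.Int.band (status_word >>> i.toNat) 1)
  -- bits[i]: every index used below is a literal in range 0..15, so pyGetD's default is never taken
  let bit : Nat → Int := fun i => PySem.List.pyGetD bits (i : Int) 0
  let T := if bit 0 ≠ 0 then "T" else "NT"
  let S := if bit 1 ≠ 0 then "S" else "NS"
  let antenna_bits := PySem.Int.bor ((bit 9) <<< (1 : Nat)) (bit 8)
  let antenna_map : PySem.Dict Int String :=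
    PySem.Dict.ofList [(0, "1"), (1, "2"), (2, "3"), (3, "4")]
  [("T", T ++ "/" ++ S),
   ("E", if bit 2 ≠ 0 then "Y" else "N"),
   ("P", if bit 3 ≠ 0 then "Y" else "N"),
   ("I", if bit 4 ≠ 0 then "Y" else "N"),
   ("S", if bit 5 ≠ 0 then "Y" else "N"),
   ("P1", if bit 6 ≠ 0 then "P" else "R"),
   ("H", if bit 7 ≠ 0 then "G" else "B"),
   ("A", antenna_map.getD antenna_bits "UK"),
   ("SR", if bit 10 ≠ 0 then "P" else "R"),
   ("R", if bit 11 ≠ 0 then "P" else "R"),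
   ("E1", if bit 12 ≠ 0 then "Y" else "N"),
   ("D", if bit 14 ≠ 0 then "Y" else "N")]

-- ===== PORT B =====
-- the _FIELDS spec table of Source B: (key, shift, mask, value table indexed by the extracted bit group)
def pvFieldTable : List (String × Nat × Int × List String) :=
  [("T", 0, 3, ["NT/NS", "T/NS", "NT/S", "T/S"]),
   ("E", 2, 1, ["N", "Y"]),
   ("P", 3, 1, ["N", "Y"]),
   ("I", 4, 1, ["N", "Y"]),
   ("S", 5, 1, ["N", "Y"]),
   ("P1", 6, 1, ["R", "P"]),
   ("H", 7, 1, ["B", "G"]),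
   ("A", 8, 3, ["1", "2", "3", "4"]),
   ("SR", 10, 1, ["R", "P"]),
   ("R", 11, 1, ["R", "P"]),
   ("E1", 12, 1, ["N", "Y"]),
   ("D", 14, 1, ["N", "Y"])]

def decode_channel_status_meaning_alt (status_word : Int) : List (String × String) :=
  -- values[(status_word >> shift) & mask]: 0 ≤ x & mask ≤ mask, so pyGetD's default is never taken
  pvFieldTable.map (fun f =>
    (f.1, PySem.List.pyGetD f.2.2.2 (PySem.Int.band (status_word >>> f.2.1) f.2.2.1) ""))

-- ===== PRECONDITION & SPEC =====
def Spec_decode_channel_status_meaning (status_word : Int) (out : List (String × String)) : Prop := out = decode_channel_status_meaning_alt status_word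
instance (status_word : Int) (out : List (String × String)) : Decidable (Spec_decode_channel_status_meaning status_word out) := by unfold Spec_decode_channel_status_meaning; infer_instance

-- ===== CLAIM (what is proved, stated in full; the proofs are below) =====
def Claim_equal_decode_channel_status_meaning : Prop := ∀ (status_word : Int), Dom_decode_channel_status_meaning status_word → Spec_decode_channel_status_meaning status_word (decode_channel_status_meaning status_word)

-- ===== LEMMAS AND PROOFS =====

lemma pv_shift (m : Int) (n : Nat) : m >>> (n : Int) = m / 2 ^ n := by
  rw [Int.shiftRight_natCast_right, Int.shiftRight_eq_div_pow]; push_cast; ring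

lemma pv_band1 (x : Int) : PySem.Int.band x 1 = x % 2 := by
  rw [PySem.Int.band_one, PySem.Int.mod_eq_emod_of_pos (by norm_num)]

lemma pv_band3 (x : Int) : PySem.Int.band x 3 = x % 4 := by
  unfold PySem.Int.band
  split_ifs with h1 h2 <;> try norm_num at *
  · have h := Nat.and_two_pow_sub_one_eq_mod x.toNat 2
    norm_num at h
    rw [show (3 : Int).toNat = 3 from rfl, h]
    omega
  · have h := Nat.and_two_pow_sub_one_eq_mod (-x - 1).toNat 2
    norm_num at h
    rw [show (3 : Int).toNat = 3 from rfl, Nat.and_comm, h]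
    omega

lemma pv_pick2 (x : Int) (a b : String) :
    PySem.List.pyGetD [a, b] (x % 2) "" = if x % 2 = 1 then b else a := by
  rcases Int.emod_two_eq_zero_or_one x with h | h <;> rw [h] <;> simp [pysem]

lemma pv_main (sw : Int) :
    decode_channel_status_meaning sw = decode_channel_status_meaning_alt sw := by
  unfold decode_channel_status_meaning decode_channel_status_meaning_alt pvFieldTable
  rw [show PySem.List.pyRange 0 16 1 = [0,1,2,3,4,5,6,7,8,9,10,11,12,13,14,15] from by decide]
  simp only [List.map_cons, List.map_nil, pv_band1, pv_band3]
  norm_num [PySem.List.pyGetD_ofNat']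
  refine ⟨?_, ?_, ?_, ?_, ?_, ?_, ?_, ?_, ?_, ?_, ?_, ?_⟩
  · rw [show sw >>> (0:Int) = sw from by have := pv_shift sw 0; norm_num at this; exact this,
        show sw >>> (1:Int) = sw / 2 from by have := pv_shift sw 1; norm_num at this; exact this,
        show sw % 4 = sw % 2 + 2 * (sw / 2 % 2) from by omega]
    rcases Int.emod_two_eq_zero_or_one sw with h0 | h0 <;>
      rcases Int.emod_two_eq_zero_or_one (sw / 2) with h1 | h1 <;>
        rw [h0, h1] <;> decide
  · exact (pv_pick2 _ _ _).symm
  · exact (pv_pick2 _ _ _).symm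
  · exact (pv_pick2 _ _ _).symm
  · exact (pv_pick2 _ _ _).symm
  · exact (pv_pick2 _ _ _).symm
  · exact (pv_pick2 _ _ _).symm
  · rw [show sw >>> (9:Int) = sw / 512 from by have := pv_shift sw 9; norm_num at this; exact this,
        show sw >>> (8:Int) = sw / 256 from by have := pv_shift sw 8; norm_num at this; exact this,
        show sw / 256 % 4 = sw / 256 % 2 + 2 * (sw / 512 % 2) from by omega]
    rcases Int.emod_two_eq_zero_or_one (sw / 256) with h0 | h0 <;>
      rcases Int.emod_two_eq_zero_or_one (sw / 512) with h1 | h1 <;>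
        rw [h0, h1] <;> decide
  · exact (pv_pick2 _ _ _).symm
  · exact (pv_pick2 _ _ _).symm
  · exact (pv_pick2 _ _ _).symm
  · exact (pv_pick2 _ _ _).symm

-- ===== VERDICT (by name: the statement is the Claim_ definition above) =====
theorem decode_channel_status_meaning_spec : Claim_equal_decode_channel_status_meaning := by
  intro sw _
  exact pv_main sw
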